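-- pv_equiv track=rewrite | github.com/yeolsim2hajo/Team_hard | wonkyoung/programmers/level 1/정수_제곱근_판별.py | solution
-- ===== SOURCE A (Python) =====
-- def solution(n):
--     start, end = 1, n
--     while start <= end:
--         mid = (start + end) // 2
--         square = mid ** 2
--         if square == n:
--             return (mid+1) ** 2
--         elif square > n:
--             end = mid - 1
--         else:
--             start = mid + 1
--     return -1
-- ===== SOURCE B (Python) =====
-- def solution(n):
--     i = 1
--     while i * i <= n:
--         if i * i == n:
--             return (i + 1) ** 2
--         i += 1
--     return -1
-- ===== Notes on version B (the rewrite author's own statement) =====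
-- stated objective: simpler
-- what changed: Replaces the binary search over an interval with a single ascending trial loop that increments a candidate and tests its square while it does not exceed n.
import Mathlib
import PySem

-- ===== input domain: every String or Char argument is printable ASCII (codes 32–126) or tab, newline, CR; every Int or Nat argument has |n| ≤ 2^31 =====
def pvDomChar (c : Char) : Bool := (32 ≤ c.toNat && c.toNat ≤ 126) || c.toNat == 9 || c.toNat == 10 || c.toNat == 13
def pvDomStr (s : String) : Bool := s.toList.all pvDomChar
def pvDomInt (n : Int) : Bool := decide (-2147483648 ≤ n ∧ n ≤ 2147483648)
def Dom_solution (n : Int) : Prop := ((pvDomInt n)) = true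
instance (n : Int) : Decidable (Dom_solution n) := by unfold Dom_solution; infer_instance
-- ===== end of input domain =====

-- B replaces the binary search with a plain ascending trial loop (simpler; same result).

-- ===== PORT A =====
-- the while loop of A, recursing on the shrinking interval [start, end]
def solutionLoop (n start end_ : Int) : Int :=
  if _h : start ≤ end_ then
    let mid := PySem.Int.floordiv (start + end_) 2
    let square := mid ^ 2
    if square = n then (mid + 1) ^ 2
    else if square > n then solutionLoop n start (mid - 1)
    else solutionLoop n (mid + 1) end_
  else -1
termination_by (end_ - start + 1).toNat
decreasing_by
  · have := PySem.Int.floordiv_two_mid_bounds _h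
    omega
  · have := PySem.Int.floordiv_two_mid_bounds _h
    omega

def solution (n : Int) : Int := solutionLoop n 1 n

-- ===== PORT B =====
-- B's while loop: ascending trial i = 1, 2, … while i*i ≤ n
def solutionAltLoop (n i : Int) : Int :=
  if _h : i * i ≤ n then
    if i * i = n then (i + 1) ^ 2
    else solutionAltLoop n (i + 1)
  else -1
termination_by (n + 1 - i).toNat
decreasing_by
  have hin : i ≤ n := by nlinarith [sq_nonneg (i - 1), sq_nonneg i]
  omega

def solution_alt (n : Int) : Int := solutionAltLoop n 1

-- ===== PRECONDITION & SPEC =====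
def Spec_solution (n : Int) (out : Int) : Prop := out = solution_alt n
instance (n : Int) (out : Int) : Decidable (Spec_solution n out) := by unfold Spec_solution; infer_instance

-- ===== CLAIM (what is proved, stated in full; the proofs are below) =====
def Claim_equal_solution : Prop := ∀ (n : Int), Dom_solution n → Spec_solution n (solution n)

-- ===== LEMMAS AND PROOFS =====

lemma sq_strict_mono (a b : Int) (ha : 0 ≤ a) (hab : a < b) : a * a < b * b := by nlinarith

lemma sq_inj (a b : Int) (ha : 0 ≤ a) (hb : 0 ≤ b) (h : a * a = b * b) : a = b := by
  rcases lt_trichotomy a b with h1 | h1 | h1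
  · exact absurd h (ne_of_lt (sq_strict_mono a b ha h1))
  · exact h1
  · exact absurd h.symm (ne_of_lt (sq_strict_mono b a hb h1))

-- B's loop finds the root r when i ≤ r
lemma altLoop_found (n i r : Int) (hi : 1 ≤ i) (hir : i ≤ r) (hr : r * r = n) :
    solutionAltLoop n i = (r + 1) ^ 2 := by
  have hrn : i * i ≤ n := by nlinarith
  rw [solutionAltLoop]
  simp only [hrn, dif_pos]
  by_cases he : i * i = n
  · have : i = r := sq_inj i r (by omega) (by omega) (by omega)
    rw [if_pos he, this]
  · have hlt : i < r := by
      rcases lt_or_eq_of_le hir with h | h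
      · exact h
      · exact absurd (by rw [h, hr]) he
    simp only [he, if_false]
    exact altLoop_found n (i + 1) r (by omega) (by omega) hr
termination_by (n + 1 - i).toNat
decreasing_by
  have : i ≤ n := by nlinarith
  omega

-- B's loop returns -1 when no root ≥ i exists
lemma altLoop_none (n i : Int) (hi : 1 ≤ i) (hno : ∀ r, i ≤ r → r * r ≠ n) :
    solutionAltLoop n i = -1 := by
  rw [solutionAltLoop]
  by_cases hle : i * i ≤ n
  · have hne : i * i ≠ n := hno i le_rfl
    simp only [hle, dif_pos, hne, if_false]
    exact altLoop_none n (i + 1) (by omega) (fun r hr => hno r (by omega))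
  · simp [hle]
termination_by (n + 1 - i).toNat
decreasing_by
  have : i ≤ n := by nlinarith
  omega

-- A's loop finds the root r when lo ≤ r ≤ hi
lemma loop_found (n lo hi r : Int) (hlo : 1 ≤ lo) (h1 : lo ≤ r) (h2 : r ≤ hi)
    (hr : r * r = n) : solutionLoop n lo hi = (r + 1) ^ 2 := by
  have hle : lo ≤ hi := le_trans h1 h2
  rw [solutionLoop]
  simp only [hle, dif_pos]
  have hmid := PySem.Int.floordiv_two_mid_bounds hle
  set mid := PySem.Int.floordiv (lo + hi) 2 with hm
  by_cases he : mid ^ 2 = n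
  · have : mid = r := sq_inj mid r (by omega) (by omega) (by nlinarith)
    rw [if_pos he, this]
  · simp only [he, if_false]
    by_cases hgt : mid ^ 2 > n
    · have hmr : r < mid := by nlinarith [sq_nonneg mid]
      rw [if_pos hgt]
      exact loop_found n lo (mid - 1) r hlo h1 (by omega) hr
    · have hmr : mid < r := by
        by_contra hcon
        rw [not_lt] at hcon
        have h3 : r * r ≤ mid * mid := mul_le_mul hcon hcon (by omega) (by omega)
        have h4 : mid ^ 2 < n := lt_of_le_of_ne (not_lt.mp hgt) he
        nlinarith [pow_two mid]
      rw [if_neg hgt]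
      exact loop_found n (mid + 1) hi r (by omega) (by omega) h2 hr
termination_by (hi - lo + 1).toNat
decreasing_by
  · omega
  · omega

-- A's loop returns -1 when no root lies in [lo, hi]
lemma loop_none (n lo hi : Int) (hno : ∀ r, lo ≤ r → r ≤ hi → r * r ≠ n) :
    solutionLoop n lo hi = -1 := by
  rw [solutionLoop]
  by_cases hle : lo ≤ hi
  · simp only [hle, dif_pos]
    have hmid := PySem.Int.floordiv_two_mid_bounds hle
    set mid := PySem.Int.floordiv (lo + hi) 2 with hm
    have he : ¬ mid ^ 2 = n := by
      have := hno mid (by omega) (by omega)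
      intro h; apply this; nlinarith
    simp only [he, if_false]
    by_cases hgt : mid ^ 2 > n
    · rw [if_pos hgt]
      exact loop_none n lo (mid - 1) (fun r h1 h2 => hno r h1 (by omega))
    · rw [if_neg hgt]
      exact loop_none n (mid + 1) hi (fun r h1 h2 => hno r (by omega) h2)
  · simp [hle]
termination_by (hi - lo + 1).toNat
decreasing_by
  · omega
  · omega

-- ===== VERDICT (by name: the statement is the Claim_ definition above) =====
theorem solution_spec : Claim_equal_solution := by
  intro n _
  unfold Spec_solution solution solution_alt
  by_cases h : ∃ r : Int, 1 ≤ r ∧ r * r = n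
  · obtain ⟨r, hr1, hr2⟩ := h
    have hrn : r ≤ n := by nlinarith
    rw [loop_found n 1 n r le_rfl hr1 hrn hr2, altLoop_found n 1 r le_rfl hr1 hr2]
  · rw [loop_none n 1 n (fun r h1 _ h2 => h ⟨r, h1, h2⟩),
        altLoop_none n 1 le_rfl (fun r h1 h2 => h ⟨r, h1, h2⟩)]
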